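-- pv_equiv track=rewrite | github.com/Workforfood1/rebuild_and_launch | launch_neuro.py | from_sentence_to_nums
-- ===== SOURCE A (Python) =====
-- def from_sentence_to_nums(string):
--     list_made_of_attributes = list()
--     sent = dict()
--
--     for index, word in enumerate(string.split()):
--         attributes = dict()
--         if len(word) == 1 and word in ['-', '//']:
--             attributes['Symbol'] = 0
--             attributes['Uppercase'] = 0
--             if word == '//':
--                 attributes['Separators'] = 2
--             elif word == '-':
--                 attributes['Separators'] = 1
--             else:
--                 attributes['Separators'] = 0
--             attributes['DotOrComma'] = 0
--             attributes['Initial'] = 0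
--
--         elif word.isalpha():
--             attributes['Symbol'] = 1
--             if word[0].isupper():
--                 attributes['Uppercase'] = 2
--             elif word[0].islower():
--                 attributes['Uppercase'] = 1
--             else:
--                 attributes['Uppercase'] = 0
--             attributes['Separators'] = 0
--             attributes['DotOrComma'] = 0
--             attributes['Initial'] = 0
--
--         elif word.isdigit():
--             attributes['Symbol'] = 2
--             attributes['Uppercase'] = 0
--             attributes['Separators'] = 0
--             attributes['DotOrComma'] = 0
--             attributes['Initial'] = 0
--
--         else:
--             attributes['Symbol'] = 3
--             attributes['Uppercase'] = 0
--             if '//' in word: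
--                 attributes['Separators'] = 2
--             elif '-' in word:
--                 attributes['Separators'] = 1
--             else:
--                 attributes['Separators'] = 0
--
--             if '.' in word:
--                 attributes['DotOrComma'] = 1
--             elif ',' in word:
--                 attributes['DotOrComma'] = 2
--             else:
--                 attributes['DotOrComma'] = 0
--
--             attributes['Initial'] = 1
--
--         list_made_of_attributes.append(attributes)
--     new_list_made_of_attributes = list()
--
--     for i, attributes in enumerate(list_made_of_attributes):
--         new_attributes = dict()
--         if i == 0:
--             for att in attributes.keys():
--                 new_attributes['Prev' + att] = 0
--         else:
--             for att in attributes.keys():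
--                 new_attributes['Prev' + att] = list_made_of_attributes[i - 1][att]
--
--         for att in attributes.keys():
--             new_attributes[att] = list_made_of_attributes[i][att]
--
--         if i == (len(list_made_of_attributes) - 1):
--             for att in attributes.keys():
--                 new_attributes['Next' + att] = 0
--         else:
--             for att in attributes.keys():
--                 new_attributes['Next' + att] = list_made_of_attributes[i + 1][att]
--
--         new_list_made_of_attributes.append(list(new_attributes.values()))
--     return new_list_made_of_attributes
-- ===== SOURCE B (Python) =====
-- ZERO15 = [0] * 15
--
--
-- def _feature_vector(word):
--     # exact classification of the original, as an ordered
--     # [Symbol, Uppercase, Separators, DotOrComma, Initial] vector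
--     if len(word) == 1 and word in ['-', '//']:
--         return [0, 0, 2 if word == '//' else (1 if word == '-' else 0), 0, 0]
--     if word.isalpha():
--         return [1,
--                 2 if word[0].isupper() else (1 if word[0].islower() else 0),
--                 0, 0, 0]
--     if word.isdigit():
--         return [2, 0, 0, 0, 0]
--     return [3, 0,
--             2 if '//' in word else (1 if '-' in word else 0),
--             1 if '.' in word else (2 if ',' in word else 0),
--             1]
--
--
-- def from_sentence_to_nums(string):
--     # scatter: start from an all-zero n x 15 matrix and write each word's
--     # 5-feature vector into the three rows it contributes to
--     words = string.split()
--     n = len(words)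
--     rows = [ZERO15[:] for _ in range(n)]
--     for j, word in enumerate(words):
--         v = _feature_vector(word)
--         rows[j] = rows[j][:5] + v + rows[j][10:]      # own row, middle slot
--         if j > 0:
--             rows[j - 1] = rows[j - 1][:10] + v        # previous row, 'Next' slot
--         if j + 1 < n:
--             rows[j + 1] = v + rows[j + 1][5:]         # following row, 'Prev' slot
--     return rows
-- ===== Notes on version B (the rewrite author's own statement) =====
-- stated objective: alternative
-- what changed: B inverts the data flow: instead of A's gather pass that builds each output row by looking up the previous/current/next attribute dicts with boundary branches at the first and last index and key-string bookkeeping, B allocates an all-zero n x 15 matrix and scatters each word's 5-feature vector into the three rows it contributes to (the trailing slot of the previous row, the middle slot of its own row, the leading slot of the following row).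
import Mathlib
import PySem

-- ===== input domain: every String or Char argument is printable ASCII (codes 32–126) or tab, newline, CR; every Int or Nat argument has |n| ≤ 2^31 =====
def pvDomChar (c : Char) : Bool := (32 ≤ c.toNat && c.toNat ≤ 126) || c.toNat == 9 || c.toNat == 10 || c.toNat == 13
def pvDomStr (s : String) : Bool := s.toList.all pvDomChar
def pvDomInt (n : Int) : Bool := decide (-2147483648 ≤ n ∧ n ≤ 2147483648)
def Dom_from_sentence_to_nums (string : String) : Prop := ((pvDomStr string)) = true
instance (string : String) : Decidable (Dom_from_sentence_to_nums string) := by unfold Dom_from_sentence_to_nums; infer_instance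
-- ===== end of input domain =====

-- B inverts the data flow: instead of A's gather pass (previous/current/next dict lookups with
-- i==0/i==last branches), B scatters each word's 5-feature vector into the three
-- rows of an all-zero n×15 matrix it contributes to (objective: alternative).

-- ===== PORT A =====
-- first loop body: the attribute dict built for one word (assignment order preserved)
def featA (w : List Char) : PySem.Dict String Int :=
  if PySem.Chars.len w == 1 && (w == "-".toList || w == "//".toList) then
    ((((PySem.Dict.empty.insert "Symbol" 0).insert "Uppercase" 0).insert "Separators"
        (if w == "//".toList then 2 else if w == "-".toList then 1 else 0)).insert
        "DotOrComma" 0).insert "Initial" 0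
  else if PySem.Chars.strIsalpha w then
    -- word[0]: guarded, w is nonempty here (isalpha is false on ""), so pyGetD is exact
    ((((PySem.Dict.empty.insert "Symbol" 1).insert "Uppercase"
        (if PySem.Chars.isupper (PySem.List.pyGetD w 0 ' ') then 2
         else if PySem.Chars.islower (PySem.List.pyGetD w 0 ' ') then 1 else 0)).insert
        "Separators" 0).insert "DotOrComma" 0).insert "Initial" 0
  else if PySem.Chars.strIsdigit w then
    ((((PySem.Dict.empty.insert "Symbol" 2).insert "Uppercase" 0).insert "Separators" 0).insert
        "DotOrComma" 0).insert "Initial" 0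
  else
    ((((PySem.Dict.empty.insert "Symbol" 3).insert "Uppercase" 0).insert "Separators"
        (if PySem.Chars.isIn "//".toList w then 2
         else if PySem.Chars.isIn "-".toList w then 1 else 0)).insert "DotOrComma"
        (if PySem.Chars.isIn ".".toList w then 1
         else if PySem.Chars.isIn ",".toList w then 2 else 0)).insert "Initial" 1

-- second loop body: builds new_attributes for index i and returns list(new_attributes.values())
-- (list[i-1], list[i], list[i+1] are guarded in-range in Python, so pyGetD is exact)
def secondBody (lst : List (PySem.Dict String Int)) (i : Int) (attributes : PySem.Dict String Int) : List Int :=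
  let na : PySem.Dict String Int :=
    if i = 0 then
      attributes.keys.foldl (fun d att => d.insert ("Prev" ++ att) 0) PySem.Dict.empty
    else
      attributes.keys.foldl
        (fun d att => d.insert ("Prev" ++ att) ((PySem.List.pyGetD lst (i - 1) PySem.Dict.empty).getD att 0)) PySem.Dict.empty
  let na := attributes.keys.foldl
      (fun d att => d.insert att ((PySem.List.pyGetD lst i PySem.Dict.empty).getD att 0)) na
  let na :=
    if i = (PySem.List.len lst) - 1 then
      attributes.keys.foldl (fun d att => d.insert ("Next" ++ att) 0) na
    else
      attributes.keys.foldl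
        (fun d att => d.insert ("Next" ++ att) ((PySem.List.pyGetD lst (i + 1) PySem.Dict.empty).getD att 0)) na
  na.values

def from_sentence_to_nums (string : String) : List (List Int) :=
  let lst := (PySem.Chars.split₀ string.toList).foldl (fun acc w => acc ++ [featA w]) []
  (PySem.List.enumerate lst).foldl (fun acc p => acc ++ [secondBody lst p.1 p.2]) []

-- ===== PORT B =====
-- _feature_vector: the ordered [Symbol, Uppercase, Separators, DotOrComma, Initial] vector
def featB (w : List Char) : List Int :=
  if PySem.Chars.len w == 1 && (w == "-".toList || w == "//".toList) then
    [0, 0, if w == "//".toList then 2 else if w == "-".toList then 1 else 0, 0, 0]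
  else if PySem.Chars.strIsalpha w then
    [1, if PySem.Chars.isupper (PySem.List.pyGetD w 0 ' ') then 2
        else if PySem.Chars.islower (PySem.List.pyGetD w 0 ' ') then 1 else 0, 0, 0, 0]
  else if PySem.Chars.strIsdigit w then
    [2, 0, 0, 0, 0]
  else
    [3, 0,
     if PySem.Chars.isIn "//".toList w then 2 else if PySem.Chars.isIn "-".toList w then 1 else 0,
     if PySem.Chars.isIn ".".toList w then 1 else if PySem.Chars.isIn ",".toList w then 2 else 0,
     1]

def pvZERO15 : List Int := List.replicate 15 0   -- ZERO15 = [0] * 15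

-- loop body: scatter word j's vector into rows j (middle), j-1 ('Next' slot), j+1 ('Prev' slot)
def scatterStep (n : Int) (rows : List (List Int)) (p : Int × List Char) : List (List Int) :=
  let j := p.1
  let v := featB p.2
  let rows := PySem.List.pySetD rows j
      (PySem.List.slice (PySem.List.pyGetD rows j []) none (some 5) ++ v ++
       PySem.List.slice (PySem.List.pyGetD rows j []) (some 10) none)
  let rows := if 0 < j then
      PySem.List.pySetD rows (j - 1)
        (PySem.List.slice (PySem.List.pyGetD rows (j - 1) []) none (some 10) ++ v)
    else rows
  if j + 1 < n then
      PySem.List.pySetD rows (j + 1)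
        (v ++ PySem.List.slice (PySem.List.pyGetD rows (j + 1) []) (some 5) none)
  else rows

def from_sentence_to_nums_alt (string : String) : List (List Int) :=
  let words := PySem.Chars.split₀ string.toList
  let n := PySem.List.len words
  let rows := (PySem.List.pyRange 0 n 1).map (fun _ => pvZERO15)
  (PySem.List.enumerate words).foldl (scatterStep n) rows

-- ===== PRECONDITION & SPEC =====
def Spec_from_sentence_to_nums (string : String) (out : List (List Int)) : Prop := out = from_sentence_to_nums_alt string
instance (string : String) (out : List (List Int)) : Decidable (Spec_from_sentence_to_nums string out) := by unfold Spec_from_sentence_to_nums; infer_instance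

-- ===== CLAIM (what is proved, stated in full; the proofs are below) =====
def Claim_equal_from_sentence_to_nums : Prop := ∀ (string : String), Dom_from_sentence_to_nums string → Spec_from_sentence_to_nums string (from_sentence_to_nums string)

-- ===== LEMMAS AND PROOFS =====

def pvZ5 : List Int := [0, 0, 0, 0, 0]

-- the row word i should finally receive: prev slot ++ own vector ++ next slot
def specRow (vecs : List (List Int)) (i : Nat) : List Int :=
  (if i = 0 then pvZ5 else vecs.getD (i - 1) pvZ5) ++ vecs.getD i pvZ5 ++
  (if i = vecs.length - 1 then pvZ5 else vecs.getD (i + 1) pvZ5)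

-- row i of B's matrix after the first j scatter iterations
def stateRow (vecs : List (List Int)) (j i : Nat) : List Int :=
  if i + 1 < j then specRow vecs i
  else if i + 1 = j then (if i = 0 then pvZ5 else vecs.getD (i - 1) pvZ5) ++ vecs.getD i pvZ5 ++ pvZ5
  else if i = j ∧ 0 < j then vecs.getD (j - 1) pvZ5 ++ pvZ5 ++ pvZ5
  else pvZ5 ++ pvZ5 ++ pvZ5

-- the dict featA builds, as a literal association list over the components of featB
def dict5 (a b c d e : Int) : PySem.Dict String Int :=
  PySem.Dict.mk [("Symbol", a), ("Uppercase", b), ("Separators", c), ("DotOrComma", d), ("Initial", e)]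

def pvKEYS : List String := ["Symbol", "Uppercase", "Separators", "DotOrComma", "Initial"]

theorem feat_shape (w : List Char) :
    ∃ a b c d e, featA w = dict5 a b c d e ∧ featB w = [a, b, c, d, e] := by
  unfold featA featB
  split_ifs <;> exact ⟨_, _, _, _, _, rfl, rfl⟩

theorem featB_len (w : List Char) : (featB w).length = 5 := by
  unfold featB; split_ifs <;> rfl

theorem dict5_keys (a b c d e : Int) : (dict5 a b c d e).keys = pvKEYS := rfl

-- the three key-folds of the second loop body insert 15 pairwise-distinct keys
theorem fold3_values (pv cv nv : String → Int) :
    (List.foldl (fun d att => d.insert ("Next" ++ att) (nv att))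
      (List.foldl (fun d att => d.insert att (cv att))
        (List.foldl (fun d att => d.insert ("Prev" ++ att) (pv att)) PySem.Dict.empty pvKEYS)
        pvKEYS)
      pvKEYS).values
    = pvKEYS.map pv ++ pvKEYS.map cv ++ pvKEYS.map nv := by
  have h1 : (List.foldl (fun d att => d.insert ("Prev" ++ att) (pv att)) PySem.Dict.empty pvKEYS).items
      = pvKEYS.map (fun att => ("Prev" ++ att, pv att)) :=
    PySem.Dict.items_foldl_insert_fresh pvKEYS _ _ _ (fun a _ => rfl) (by decide)
  have hf2 : ∀ a ∈ pvKEYS,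
      (List.foldl (fun d att => d.insert ("Prev" ++ att) (pv att)) PySem.Dict.empty pvKEYS).contains a = false := by
    intro a ha
    rw [PySem.Dict.contains_eq_decide_mem_keys]
    fin_cases ha <;> simp [PySem.Dict.keys, h1] <;> decide
  have h2 : (List.foldl (fun d att => d.insert att (cv att))
        (List.foldl (fun d att => d.insert ("Prev" ++ att) (pv att)) PySem.Dict.empty pvKEYS) pvKEYS).items
      = pvKEYS.map (fun att => ("Prev" ++ att, pv att)) ++ pvKEYS.map (fun att => (att, cv att)) := by
    rw [PySem.Dict.items_foldl_insert_fresh pvKEYS (fun a => a) cv _ hf2 (by decide), h1]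
  have hf3 : ∀ a ∈ pvKEYS,
      (List.foldl (fun d att => d.insert att (cv att))
        (List.foldl (fun d att => d.insert ("Prev" ++ att) (pv att)) PySem.Dict.empty pvKEYS) pvKEYS).contains
        ("Next" ++ a) = false := by
    intro a ha
    rw [PySem.Dict.contains_eq_decide_mem_keys]
    fin_cases ha <;> simp [PySem.Dict.keys, h2] <;> decide
  have h3 : (List.foldl (fun d att => d.insert ("Next" ++ att) (nv att))
      (List.foldl (fun d att => d.insert att (cv att))
        (List.foldl (fun d att => d.insert ("Prev" ++ att) (pv att)) PySem.Dict.empty pvKEYS)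
        pvKEYS) pvKEYS).items
      = pvKEYS.map (fun att => ("Prev" ++ att, pv att)) ++ pvKEYS.map (fun att => (att, cv att))
        ++ pvKEYS.map (fun att => ("Next" ++ att, nv att)) := by
    rw [PySem.Dict.items_foldl_insert_fresh pvKEYS (fun a => "Next" ++ a) nv _ hf3 (by decide), h2]
  simp only [PySem.Dict.values, h3, List.map_append, List.map_map]
  rfl

-- evaluating the second loop body on dicts of the known shape
theorem body_eval (lst : List (PySem.Dict String Int)) (i : Int)
    (p1 p2 p3 p4 p5 c1 c2 c3 c4 c5 n1 n2 n3 n4 n5 : Int)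
    (hP : i ≠ 0 → PySem.List.pyGetD lst (i - 1) PySem.Dict.empty = dict5 p1 p2 p3 p4 p5)
    (hC : PySem.List.pyGetD lst i PySem.Dict.empty = dict5 c1 c2 c3 c4 c5)
    (hN : i ≠ PySem.List.len lst - 1 → PySem.List.pyGetD lst (i + 1) PySem.Dict.empty = dict5 n1 n2 n3 n4 n5) :
    secondBody lst i (dict5 c1 c2 c3 c4 c5) =
      (if i = 0 then pvZ5 else [p1, p2, p3, p4, p5]) ++ [c1, c2, c3, c4, c5] ++
      (if i = PySem.List.len lst - 1 then pvZ5 else [n1, n2, n3, n4, n5]) := by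
  unfold secondBody
  simp only [dict5_keys]
  by_cases h0 : i = 0
  · subst h0
    rw [if_pos rfl, if_pos rfl, hC]
    by_cases hl : (0 : Int) = PySem.List.len lst - 1
    · simp only [if_pos hl]
      exact (fold3_values (fun _ => 0) _ (fun _ => 0)).trans (by rfl)
    · simp only [if_neg hl, hN hl]
      exact (fold3_values (fun _ => 0) _ _).trans (by rfl)
  · rw [if_neg h0, if_neg h0, hP h0, hC]
    by_cases hl : i = PySem.List.len lst - 1
    · simp only [if_pos hl]
      exact (fold3_values _ _ (fun _ => 0)).trans (by rfl)
    · simp only [if_neg hl, hN hl]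
      exact (fold3_values _ _ _).trans (by rfl)

-- vecs lookups
theorem vec_at (ws : List (List Char)) (m : Nat) (hm : m < ws.length) :
    (ws.map featB).getD m pvZ5 = featB (ws[m]'hm) := by
  rw [List.getD_eq_getElem?_getD, List.getElem?_map, List.getElem?_eq_getElem hm]
  rfl

theorem vec_len (ws : List (List Char)) (m : Nat) :
    ((ws.map featB).getD m pvZ5).length = 5 := by
  by_cases hm : m < ws.length
  · rw [vec_at ws m hm]; exact featB_len _
  · rw [List.getD_eq_default _ _ (by simpa using Nat.le_of_not_lt hm)]; rfl

-- take/drop on length-5 blocks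
theorem take5_append (a b c : List Int) (ha : a.length = 5) : (a ++ b ++ c).take 5 = a := by
  rw [List.append_assoc, ← ha]; exact List.take_left
theorem drop5_append (a b c : List Int) (ha : a.length = 5) : (a ++ b ++ c).drop 5 = b ++ c := by
  rw [List.append_assoc, ← ha]; exact List.drop_left
theorem take10_append (a b y : List Int) (ha : a.length = 5) (hb : b.length = 5) :
    (a ++ b ++ y).take 10 = a ++ b := by
  rw [show (10:Nat) = (a ++ b).length by simp [ha, hb], List.take_left]
theorem drop10_append (a b y : List Int) (ha : a.length = 5) (hb : b.length = 5) :
    (a ++ b ++ y).drop 10 = y := by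
  rw [show (10:Nat) = (a ++ b).length by simp [ha, hb], List.drop_left]

theorem prev_len (vecs : List (List Int)) (ws : List (List Char)) (hv : vecs = ws.map featB)
    (i : Nat) : (if i = 0 then pvZ5 else vecs.getD (i - 1) pvZ5).length = 5 := by
  subst hv; split
  · rfl
  · exact vec_len ws _

-- indexing / setting a (range n).map row matrix
theorem getD_row (g : Nat → List Int) (n j : Nat) (hj : j < n) (d : List Int) :
    PySem.List.pyGetD ((List.range n).map g) (j : Int) d = g j := by
  rw [PySem.List.pyGetD_natCast]
  simp [hj]

theorem set_row (g : Nat → List Int) (n j : Nat) (v : List Int) :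
    ((List.range n).map g).set j v = (List.range n).map (fun i => if i = j then v else g i) := by
  apply List.ext_getElem (by simp)
  intro k h1 h2
  simp only [List.getElem_set, List.getElem_map, List.getElem_range]
  rcases eq_or_ne j k with h | h
  · simp [h]
  · rw [if_neg h, if_neg (Ne.symm h)]

-- A's second pass computes specRow at every index
theorem a_rows (ws : List (List Char)) :
    (List.range ws.length).map
      (fun (k : Nat) => secondBody (ws.map featA) ((k : Nat) : Int)
        (PySem.List.pyGetD (ws.map featA) ((k : Nat) : Int) PySem.Dict.empty)) =
    (List.range ws.length).map (fun k => specRow (ws.map featB) k) := by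
  apply List.map_congr_left
  intro k hk
  rw [List.mem_range] at hk
  have hlen : PySem.List.len (List.map featA ws) = (ws.length : Int) := by
    simp [PySem.List.len]
  obtain ⟨a, b, c, d, e, hA, hB⟩ := feat_shape (ws[k]'hk)
  have hC : PySem.List.pyGetD (List.map featA ws) (↑k) PySem.Dict.empty = dict5 a b c d e := by
    rw [PySem.List.pyGetD_eq_getElem _ _ (by omega) (by simp only [List.length_map]; omega)]
    simp only [Int.toNat_natCast, List.getElem_map]
    exact hA
  unfold specRow
  simp only [List.length_map]
  by_cases hk0 : k = 0 <;> by_cases hkl : k = ws.length - 1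
  · -- single word
    rw [hC, body_eval _ _ 0 0 0 0 0 a b c d e 0 0 0 0 0
          (fun h => absurd (show ((k : Nat) : Int) = 0 by omega) h) hC
          (fun h => absurd (show ((k : Nat) : Int) = PySem.List.len (List.map featA ws) - 1 by
            rw [hlen]; omega) h),
        hlen, if_pos (show ((k : Nat) : Int) = 0 by omega),
        if_pos (show ((k : Nat) : Int) = (ws.length : Int) - 1 by omega),
        if_pos hk0, if_pos hkl, vec_at ws k hk, hB]
  · -- first of several
    obtain ⟨n1, n2, n3, n4, n5, hnA, hnB⟩ := feat_shape (ws[k + 1]'(by omega))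
    have hN : PySem.List.pyGetD (List.map featA ws) ((k : Int) + 1) PySem.Dict.empty = dict5 n1 n2 n3 n4 n5 := by
      rw [show ((k : Int) + 1) = ((k + 1 : Nat) : Int) by omega,
          PySem.List.pyGetD_eq_getElem _ _ (by omega) (by simp only [List.length_map]; omega)]
      simp only [Int.toNat_natCast, List.getElem_map]
      exact hnA
    rw [hC, body_eval _ _ 0 0 0 0 0 a b c d e n1 n2 n3 n4 n5
          (fun h => absurd (show ((k : Nat) : Int) = 0 by omega) h) hC (fun _ => hN),
        hlen, if_pos (show ((k : Nat) : Int) = 0 by omega),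
        if_neg (show ¬(((k : Nat) : Int) = (ws.length : Int) - 1) by omega),
        if_pos hk0, if_neg hkl, vec_at ws k hk, vec_at ws (k + 1) (by omega), hB, hnB]
  · -- last of several
    obtain ⟨p1, p2, p3, p4, p5, hpA, hpB⟩ := feat_shape (ws[k - 1]'(by omega))
    have hP : PySem.List.pyGetD (List.map featA ws) ((k : Int) - 1) PySem.Dict.empty = dict5 p1 p2 p3 p4 p5 := by
      rw [show ((k : Int) - 1) = ((k - 1 : Nat) : Int) by omega,
          PySem.List.pyGetD_eq_getElem _ _ (by omega) (by simp only [List.length_map]; omega)]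
      simp only [Int.toNat_natCast, List.getElem_map]
      exact hpA
    rw [hC, body_eval _ _ p1 p2 p3 p4 p5 a b c d e 0 0 0 0 0
          (fun _ => hP) hC
          (fun h => absurd (show ((k : Nat) : Int) = PySem.List.len (List.map featA ws) - 1 by
            rw [hlen]; omega) h),
        hlen, if_neg (show ¬(((k : Nat) : Int) = 0) by omega),
        if_pos (show ((k : Nat) : Int) = (ws.length : Int) - 1 by omega),
        if_neg hk0, if_pos hkl, vec_at ws k hk, vec_at ws (k - 1) (by omega), hB, hpB]
  · -- middle word
    obtain ⟨p1, p2, p3, p4, p5, hpA, hpB⟩ := feat_shape (ws[k - 1]'(by omega))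
    obtain ⟨n1, n2, n3, n4, n5, hnA, hnB⟩ := feat_shape (ws[k + 1]'(by omega))
    have hP : PySem.List.pyGetD (List.map featA ws) ((k : Int) - 1) PySem.Dict.empty = dict5 p1 p2 p3 p4 p5 := by
      rw [show ((k : Int) - 1) = ((k - 1 : Nat) : Int) by omega,
          PySem.List.pyGetD_eq_getElem _ _ (by omega) (by simp only [List.length_map]; omega)]
      simp only [Int.toNat_natCast, List.getElem_map]
      exact hpA
    have hN : PySem.List.pyGetD (List.map featA ws) ((k : Int) + 1) PySem.Dict.empty = dict5 n1 n2 n3 n4 n5 := by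
      rw [show ((k : Int) + 1) = ((k + 1 : Nat) : Int) by omega,
          PySem.List.pyGetD_eq_getElem _ _ (by omega) (by simp only [List.length_map]; omega)]
      simp only [Int.toNat_natCast, List.getElem_map]
      exact hnA
    rw [hC, body_eval _ _ p1 p2 p3 p4 p5 a b c d e n1 n2 n3 n4 n5
          (fun _ => hP) hC (fun _ => hN),
        hlen, if_neg (show ¬(((k : Nat) : Int) = 0) by omega),
        if_neg (show ¬(((k : Nat) : Int) = (ws.length : Int) - 1) by omega),
        if_neg hk0, if_neg hkl, vec_at ws k hk, vec_at ws (k - 1) (by omega),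
        vec_at ws (k + 1) (by omega), hB, hpB, hnB]

-- one scatter step advances the state by one word
theorem step_eq (ws : List (List Char)) (j : Nat) (hj : j < ws.length) (w : List Char)
    (hw : w = ws[j]'hj) :
    scatterStep (PySem.List.len ws)
      ((List.range ws.length).map (fun i => stateRow (ws.map featB) j i)) ((j : Int), w) =
    (List.range ws.length).map (fun i => stateRow (ws.map featB) (j + 1) i) := by
  subst hw
  have hlen : PySem.List.len ws = (ws.length : Int) := by simp [PySem.List.len]
  have hv5 : ∀ m, ((ws.map featB).getD m pvZ5).length = 5 := vec_len ws
  have hp5 : ∀ i, (if i = 0 then pvZ5 else (ws.map featB).getD (i - 1) pvZ5).length = 5 :=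
    prev_len (ws.map featB) ws rfl
  unfold scatterStep
  dsimp only
  rw [getD_row _ _ _ hj, hlen,
      PySem.List.slice_to _ (by norm_num), PySem.List.slice_from _ (by norm_num)]
  simp only [show Int.toNat 5 = 5 from rfl, show Int.toNat 10 = 10 from rfl]
  rw [PySem.List.pySetD_natCast, set_row]
  by_cases h0 : 0 < j
  · -- the 'Next' slot of row j-1 is written
    rw [if_pos (show (0 : Int) < (j : Int) by exact_mod_cast h0),
        show ((j : Int) - 1) = ((j - 1 : Nat) : Int) by omega,
        getD_row _ _ _ (by omega), if_neg (show ¬(j - 1 = j) by omega),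
        PySem.List.slice_to _ (by norm_num)]
    simp only [show Int.toNat 10 = 10 from rfl]
    rw [PySem.List.pySetD_natCast, set_row]
    -- row j before this step: vecs[j-1] ++ Z5 ++ Z5; row j-1: P(j-1) ++ vecs[j-1] ++ Z5
    have hrj : stateRow (ws.map featB) j j = (ws.map featB).getD (j - 1) pvZ5 ++ pvZ5 ++ pvZ5 := by
      unfold stateRow
      rw [if_neg (show ¬(j + 1 < j) by omega), if_neg (show ¬(j + 1 = j) by omega),
          if_pos (show j = j ∧ 0 < j from ⟨rfl, h0⟩)]
    have hrjm : stateRow (ws.map featB) j (j - 1) =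
        (if j - 1 = 0 then pvZ5 else (ws.map featB).getD (j - 1 - 1) pvZ5) ++
          (ws.map featB).getD (j - 1) pvZ5 ++ pvZ5 := by
      unfold stateRow
      rw [if_neg (show ¬(j - 1 + 1 < j) by omega), if_pos (show j - 1 + 1 = j by omega)]
    rw [hrj, hrjm, take5_append _ _ _ (hv5 _), drop10_append _ _ _ (hv5 _) rfl,
        take10_append _ _ _ (hp5 _) (hv5 _)]
    by_cases h1 : j + 1 < ws.length
    · rw [if_pos (show ((j : Int) + 1) < (ws.length : Int) by exact_mod_cast h1),
          show ((j : Int) + 1) = ((j + 1 : Nat) : Int) by omega,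
          getD_row _ _ _ h1, if_neg (show ¬(j + 1 = j - 1) by omega),
          if_neg (show ¬(j + 1 = j) by omega),
          PySem.List.slice_from _ (by norm_num)]
      simp only [show Int.toNat 5 = 5 from rfl]
      rw [PySem.List.pySetD_natCast, set_row]
      have hrjp : stateRow (ws.map featB) j (j + 1) = pvZ5 ++ pvZ5 ++ pvZ5 := by
        unfold stateRow
        rw [if_neg (show ¬(j + 1 + 1 < j) by omega), if_neg (show ¬(j + 1 + 1 = j) by omega),
            if_neg (show ¬(j + 1 = j ∧ 0 < j) by omega)]
      rw [hrjp, drop5_append _ _ _ rfl]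
      apply List.map_congr_left
      intro i hi
      rw [List.mem_range] at hi
      rcases eq_or_ne i (j + 1) with h | hne1
      · subst h
        rw [if_pos rfl]
        unfold stateRow
        rw [if_neg (show ¬(j + 1 + 1 < j + 1) by omega),
            if_neg (show ¬(j + 1 + 1 = j + 1) by omega),
            if_pos (show j + 1 = j + 1 ∧ 0 < j + 1 from ⟨rfl, by omega⟩)]
        simp only [Nat.add_sub_cancel]
        rw [vec_at ws j hj, List.append_assoc]
      · rw [if_neg hne1]
        rcases eq_or_ne i (j - 1) with h | hne2
        · subst h
          rw [if_pos rfl]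
          unfold stateRow
          rw [if_pos (show j - 1 + 1 < j + 1 by omega)]
          unfold specRow
          rw [if_neg (show ¬(j - 1 = (ws.map featB).length - 1) by
                simp only [List.length_map]; omega),
              show j - 1 + 1 = j by omega, vec_at ws j hj]
        · rw [if_neg hne2]
          rcases eq_or_ne i j with h | hne3
          · rw [if_pos h, h]
            unfold stateRow
            rw [if_neg (show ¬(j + 1 < j + 1) by omega), if_pos (show j + 1 = j + 1 from rfl),
                if_neg (show ¬(j = 0) by omega), vec_at ws j hj]
          · rw [if_neg hne3]
            unfold stateRow
            rcases lt_trichotomy (i + 1) j with h | h | h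
            · rw [if_pos h, if_pos (show i + 1 < j + 1 by omega)]
            · omega
            · rw [if_neg (show ¬(i + 1 < j) by omega), if_neg (show ¬(i + 1 = j) by omega),
                  if_neg (show ¬(i = j ∧ 0 < j) by omega),
                  if_neg (show ¬(i + 1 < j + 1) by omega), if_neg (show ¬(i + 1 = j + 1) by omega),
                  if_neg (show ¬(i = j + 1 ∧ 0 < j + 1) by omega)]
    · -- j is the last word: no 'Prev' write
      rw [if_neg (show ¬(((j : Int) + 1) < (ws.length : Int)) by exact_mod_cast h1)]
      apply List.map_congr_left
      intro i hi
      rw [List.mem_range] at hi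
      rcases eq_or_ne i (j - 1) with h | hne2
      · subst h
        rw [if_pos rfl]
        unfold stateRow
        rw [if_pos (show j - 1 + 1 < j + 1 by omega)]
        unfold specRow
        rw [if_neg (show ¬(j - 1 = (ws.map featB).length - 1) by
              simp only [List.length_map]; omega),
            show j - 1 + 1 = j by omega, vec_at ws j hj]
      · rw [if_neg hne2]
        rcases eq_or_ne i j with h | hne3
        · rw [if_pos h, h]
          unfold stateRow
          rw [if_neg (show ¬(j + 1 < j + 1) by omega), if_pos (show j + 1 = j + 1 from rfl),
              if_neg (show ¬(j = 0) by omega), vec_at ws j hj]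
        · rw [if_neg hne3]
          unfold stateRow
          rcases lt_trichotomy (i + 1) j with h | h | h
          · rw [if_pos h, if_pos (show i + 1 < j + 1 by omega)]
          · omega
          · rw [if_neg (show ¬(i + 1 < j) by omega), if_neg (show ¬(i + 1 = j) by omega),
                if_neg (show ¬(i = j ∧ 0 < j) by omega),
                if_neg (show ¬(i + 1 < j + 1) by omega), if_neg (show ¬(i + 1 = j + 1) by omega),
                if_neg (show ¬(i = j + 1 ∧ 0 < j + 1) by omega)]
  · -- j = 0: no 'Next' write
    have hj0 : j = 0 := by omega
    subst hj0
    rw [if_neg (show ¬((0 : Int) < ((0 : Nat) : Int)) by norm_num)]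
    have hrj : stateRow (ws.map featB) 0 0 = pvZ5 ++ pvZ5 ++ pvZ5 := by
      unfold stateRow
      rw [if_neg (show ¬(0 + 1 < 0) by omega), if_neg (show ¬(0 + 1 = 0) by omega),
          if_neg (show ¬(0 = 0 ∧ 0 < 0) by omega)]
    rw [hrj, take5_append _ _ _ rfl, drop10_append _ _ _ rfl rfl]
    by_cases h1 : 0 + 1 < ws.length
    · rw [if_pos (show (((0 : Nat) : Int) + 1) < (ws.length : Int) by exact_mod_cast h1),
          show (((0 : Nat) : Int) + 1) = ((1 : Nat) : Int) by norm_num,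
          getD_row _ _ _ (by omega), if_neg (show ¬((1 : Nat) = 0) by omega),
          PySem.List.slice_from _ (by norm_num)]
      simp only [show Int.toNat 5 = 5 from rfl]
      rw [PySem.List.pySetD_natCast, set_row]
      have hrjp : stateRow (ws.map featB) 0 1 = pvZ5 ++ pvZ5 ++ pvZ5 := by
        unfold stateRow
        rw [if_neg (show ¬(1 + 1 < 0) by omega), if_neg (show ¬(1 + 1 = 0) by omega),
            if_neg (show ¬(1 = 0 ∧ 0 < 0) by omega)]
      rw [hrjp, drop5_append _ _ _ rfl]
      apply List.map_congr_left
      intro i hi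
      rw [List.mem_range] at hi
      rcases eq_or_ne i 1 with h | hne1
      · subst h
        rw [if_pos rfl]
        unfold stateRow
        rw [if_neg (show ¬(1 + 1 < 0 + 1) by omega), if_neg (show ¬(1 + 1 = 0 + 1) by omega),
            if_pos (show 1 = 0 + 1 ∧ 0 < 0 + 1 from ⟨rfl, by omega⟩)]
        rw [vec_at ws 0 (by omega), List.append_assoc]
      · rw [if_neg hne1]
        rcases eq_or_ne i 0 with h | hne3
        · subst h
          rw [if_pos rfl]
          unfold stateRow
          rw [if_neg (show ¬(0 + 1 < 0 + 1) by omega), if_pos (show 0 + 1 = 0 + 1 from rfl),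
              if_pos (show (0 : Nat) = 0 from rfl), vec_at ws 0 (by omega)]
        · rw [if_neg hne3]
          unfold stateRow
          rw [if_neg (show ¬(i + 1 < 0) by omega), if_neg (show ¬(i + 1 = 0) by omega),
              if_neg (show ¬(i = 0 ∧ 0 < 0) by omega),
              if_neg (show ¬(i + 1 < 0 + 1) by omega), if_neg (show ¬(i + 1 = 0 + 1) by omega),
              if_neg (show ¬(i = 0 + 1 ∧ 0 < 0 + 1) by omega)]
    · rw [if_neg (show ¬((((0 : Nat) : Int) + 1) < (ws.length : Int)) by exact_mod_cast h1)]
      apply List.map_congr_left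
      intro i hi
      rw [List.mem_range] at hi
      have hi0 : i = 0 := by omega
      subst hi0
      rw [if_pos rfl]
      unfold stateRow
      rw [if_neg (show ¬(0 + 1 < 0 + 1) by omega), if_pos (show 0 + 1 = 0 + 1 from rfl),
          if_pos (show (0 : Nat) = 0 from rfl), vec_at ws 0 (by omega)]

-- folding the remaining words from state j reaches the final state
theorem scatter_fold (ws : List (List Char)) : ∀ (j : Nat), j ≤ ws.length →
    List.foldl (scatterStep (PySem.List.len ws))
      ((List.range ws.length).map (fun i => stateRow (ws.map featB) j i))
      (PySem.List.enumerate (ws.drop j) (j : Int)) =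
    (List.range ws.length).map (fun i => stateRow (ws.map featB) ws.length i) := by
  intro j hj
  induction hk : ws.length - j generalizing j with
  | zero =>
    have hje : j = ws.length := by omega
    subst hje
    rw [List.drop_length]
    rfl
  | succ k ih =>
    have hjlt : j < ws.length := by omega
    rw [List.drop_eq_getElem_cons hjlt, PySem.List.enumerate_cons, List.foldl_cons,
        step_eq ws j hjlt _ rfl, show ((j : Int) + 1) = ((j + 1 : Nat) : Int) by omega]
    exact ih (j + 1) (by omega) (by omega)

-- A's whole second pass, normalized
theorem a_side (ws : List (List Char)) :
    (PySem.List.pyRange 0 (PySem.List.len (ws.map featA))).map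
      (fun j => secondBody (ws.map featA) j (PySem.List.pyGetD (ws.map featA) j PySem.Dict.empty)) =
    (List.range ws.length).map (fun k => specRow (ws.map featB) k) := by
  have hlen : PySem.List.len (ws.map featA) = ((ws.length : Nat) : Int) := by
    simp [PySem.List.len]
  rw [hlen, PySem.List.pyRange_zero_natCast, List.map_map]
  exact a_rows ws

-- B's whole scatter loop, normalized
theorem b_side (ws : List (List Char)) :
    (PySem.List.enumerate ws).foldl (scatterStep (PySem.List.len ws))
      ((PySem.List.pyRange 0 (PySem.List.len ws) 1).map (fun _ => pvZERO15)) =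
    (List.range ws.length).map (fun k => specRow (ws.map featB) k) := by
  have hlen : PySem.List.len ws = ((ws.length : Nat) : Int) := by simp [PySem.List.len]
  rw [hlen, PySem.List.pyRange_zero_natCast, List.map_map]
  have h0 : (List.range ws.length).map ((fun _ => pvZERO15) ∘ (fun (k : Nat) => (k : Int))) =
      (List.range ws.length).map (fun i => stateRow (ws.map featB) 0 i) := by
    apply List.map_congr_left
    intro i _
    unfold stateRow
    rw [if_neg (show ¬(i + 1 < 0) by omega), if_neg (show ¬(i + 1 = 0) by omega),
        if_neg (show ¬(i = 0 ∧ 0 < 0) by omega)]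
    rfl
  rw [h0]
  have hsf := scatter_fold ws 0 (Nat.zero_le _)
  rw [List.drop_zero, Nat.cast_zero, hlen] at hsf
  rw [hsf]
  apply List.map_congr_left
  intro i hi
  rw [List.mem_range] at hi
  unfold stateRow
  by_cases h : i + 1 < ws.length
  · rw [if_pos h]
  · rw [if_neg h, if_pos (show i + 1 = ws.length by omega)]
    unfold specRow
    rw [if_pos (show i = (ws.map featB).length - 1 by simp only [List.length_map]; omega)]

-- ===== VERDICT (by name: the statement is the Claim_ definition above) =====
theorem from_sentence_to_nums_spec : Claim_equal_from_sentence_to_nums := by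
  intro string _
  show _ = _
  unfold from_sentence_to_nums from_sentence_to_nums_alt
  dsimp only
  simp only [PySem.List.foldl_append_singleton_eq_map, List.nil_append,
    PySem.List.enumerate_eq_map_pyRange _ PySem.Dict.empty, List.map_map]
  exact (a_side (PySem.Chars.split₀ string.toList)).trans
    (b_side (PySem.Chars.split₀ string.toList)).symm
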